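-- pv_equiv track=rewrite | github.com/ljunker/AdventOfCode-2023-python | Day01.py | find_calib_value2
-- ===== SOURCE A (Python) =====
-- def convert_to_digit(word):
--     word_to_digit = {
--         'zero': '0',
--         'one': '1',
--         'two': '2',
--         'three': '3',
--         'four': '4',
--         'five': '5',
--         'six': '6',
--         'seven': '7',
--         'eight': '8',
--         'nine': '9'
--     }
--     return word_to_digit.get(word, '')
--
-- def find_calib_value2(line):
--     digits_words = ['one', 'two', 'three', 'four', 'five', 'six', 'seven', 'eight', 'nine']
--     digits = []
--
--     for i in range(len(line)):
--         if line[i].isdigit():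
--             digits.append(line[i])
--         if line[i].isalpha():
--             for digit in digits_words:
--                 if line[i:i + len(digit)] == digit:
--                     digits.append(convert_to_digit(digit))
--     if len(digits) >= 2:
--         first = digits[0]
--         last = digits[-1]
--         return int(first + last)
--     if len(digits) == 1:
--         return int(digits[0] + digits[0])
--     return 0
-- ===== SOURCE B (Python) =====
-- WORDS = [('one', '1'), ('two', '2'), ('three', '3'), ('four', '4'),
--          ('five', '5'), ('six', '6'), ('seven', '7'), ('eight', '8'), ('nine', '9')]
--
--
-- def _digit_at(line, i):
--     c = line[i]
--     if c.isdigit():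
--         return c
--     for word, d in WORDS:
--         if line[i:i + len(word)] == word:
--             return d
--     return None
--
--
-- def find_calib_value2(line):
--     n = len(line)
--     first = None
--     for i in range(n):
--         first = _digit_at(line, i)
--         if first is not None:
--             break
--     if first is None:
--         return 0
--     last = None
--     for i in range(n - 1, -1, -1):
--         last = _digit_at(line, i)
--         if last is not None:
--             break
--     return int(first + last)
-- ===== Notes on version B (the rewrite author's own statement) =====
-- stated objective: alternative
-- what changed: A makes one full pass collecting every digit/word occurrence into a list and then reads its first and last elements; B builds no list: it scans forward stopping at the first digit or spelled word and scans backward stopping at the last one.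
import Mathlib
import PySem

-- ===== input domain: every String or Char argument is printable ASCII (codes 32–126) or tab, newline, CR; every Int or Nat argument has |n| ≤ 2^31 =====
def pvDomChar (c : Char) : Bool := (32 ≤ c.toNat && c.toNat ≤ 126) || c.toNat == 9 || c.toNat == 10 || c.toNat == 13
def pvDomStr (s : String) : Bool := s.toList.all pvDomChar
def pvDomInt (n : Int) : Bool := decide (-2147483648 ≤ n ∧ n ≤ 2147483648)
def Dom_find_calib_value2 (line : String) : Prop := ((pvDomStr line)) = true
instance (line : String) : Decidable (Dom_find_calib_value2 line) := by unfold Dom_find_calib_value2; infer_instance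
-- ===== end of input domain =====

-- B replaces A's full pass that collects every digit/word occurrence into a list by two
-- early-stopping scans (forward for the first, backward for the last); same word detection,
-- same output rule; same asymptotic cost.

-- ===== PORT A =====
def convert_to_digit (word : List Char) : List Char :=
  (PySem.Dict.mk [("zero".toList, "0".toList), ("one".toList, "1".toList),
    ("two".toList, "2".toList), ("three".toList, "3".toList), ("four".toList, "4".toList),
    ("five".toList, "5".toList), ("six".toList, "6".toList), ("seven".toList, "7".toList),
    ("eight".toList, "8".toList), ("nine".toList, "9".toList)]).getD word "".toList

def pvDigitsWords : List (List Char) :=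
  ["one".toList, "two".toList, "three".toList, "four".toList, "five".toList,
   "six".toList, "seven".toList, "eight".toList, "nine".toList]

def find_calib_value2 (line : String) : Int :=
  let cs := line.toList
  let digits : List (List Char) :=
    (PySem.List.pyRange 0 (PySem.Str.len line)).foldl (fun digits i =>
      let c := PySem.List.pyGetD cs i ' '
      let digits := if PySem.Chars.isdigit c then digits ++ [[c]] else digits
      if PySem.Chars.isalpha c then
        pvDigitsWords.foldl (fun digits w =>
          if PySem.List.slice cs (some i) (some (i + w.length)) == w then
            digits ++ [convert_to_digit w]
          else digits) digits
      else digits) []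
  if 2 ≤ digits.length then
    let first := PySem.List.pyGetD digits 0 []
    let last := PySem.List.pyGetD digits (-1) []
    (PySem.Int.ofChars? (first ++ last)).getD 0
  else if digits.length = 1 then
    let d := PySem.List.pyGetD digits 0 []
    (PySem.Int.ofChars? (d ++ d)).getD 0
  else 0

-- ===== PORT B =====
def pvWords : List (List Char × Char) :=
  [("one".toList, '1'), ("two".toList, '2'), ("three".toList, '3'), ("four".toList, '4'),
   ("five".toList, '5'), ("six".toList, '6'), ("seven".toList, '7'), ("eight".toList, '8'),
   ("nine".toList, '9')]

def pvDigitAt (cs : List Char) (i : Int) : Option Char :=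
  let c := PySem.List.pyGetD cs i ' '
  if PySem.Chars.isdigit c then some c
  else
    pvWords.findSome? (fun wd =>
      if PySem.List.slice cs (some i) (some (i + wd.1.length)) == wd.1 then some wd.2 else none)

def find_calib_value2_alt (line : String) : Int :=
  let cs := line.toList
  let n : Int := PySem.Str.len line
  match (PySem.List.pyRange 0 n).findSome? (pvDigitAt cs) with
  | none => 0
  | some f =>
    match (PySem.List.pyRange (n - 1) (-1) (-1)).findSome? (pvDigitAt cs) with
    | some l => (PySem.Int.ofChars? [f, l]).getD 0
    | none => 0

-- ===== PRECONDITION & SPEC =====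
def Spec_find_calib_value2 (line : String) (out : Int) : Prop := out = find_calib_value2_alt line
instance (line : String) (out : Int) : Decidable (Spec_find_calib_value2 line out) := by unfold Spec_find_calib_value2; infer_instance

-- ===== CLAIM (what is proved, stated in full; the proofs are below) =====
def Claim_equal_find_calib_value2 : Prop := ∀ (line : String), Dom_find_calib_value2 line → Spec_find_calib_value2 line (find_calib_value2 line)

-- ===== LEMMAS AND PROOFS =====

-- the word-match test A and B share, as a Bool predicate on the word
def pvQ (cs : List Char) (i : Int) (w : List Char) : Bool :=
  PySem.List.slice cs (some i) (some (i + w.length)) == w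

-- per-index contribution of A's loop, as the list of digit CHARS it appends at index i
def pvMs (cs : List Char) (i : Int) : List Char :=
  let c := PySem.List.pyGetD cs i ' '
  (if PySem.Chars.isdigit c then [c] else []) ++
  (if PySem.Chars.isalpha c then (pvWords.filter (fun wd => pvQ cs i wd.1)).map Prod.snd else [])

lemma pv_isdigit_not_isalpha (c : Char) (h : PySem.Chars.isdigit c = true) :
    PySem.Chars.isalpha c = false := by
  simp [PySem.Chars.isdigit, PySem.Chars.isalpha, PySem.Chars.isupper, PySem.Chars.islower,
    Char.le_def, UInt32.le_iff_toNat_le] at *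
  omega

lemma pv_q_prefix (cs : List Char) (i : Int) (hi : 0 ≤ i) (w : List Char)
    (h : pvQ cs i w = true) : w <+: cs.drop i.toNat := by
  unfold pvQ at h
  have hb : (0 : Int) ≤ i + w.length := by positivity
  rw [PySem.List.slice_toNat cs hi hb] at h
  have h' := beq_iff_eq.mp h
  have hw : ((i + (w.length : Int)).toNat - i.toNat) = w.length := by omega
  rw [hw] at h'
  exact List.prefix_iff_eq_take.mpr h'.symm

lemma pv_filter_len_le_one {α : Type} [DecidableEq α] (p : α → Bool) (xs : List α)
    (hnd : xs.Nodup) (h : ∀ a ∈ xs, ∀ b ∈ xs, p a = true → p b = true → a = b) :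
    ((xs.filter p).length ≤ 1) := by
  induction xs with
  | nil => simp
  | cons x xs ih =>
    rw [List.nodup_cons] at hnd
    by_cases hp : p x = true
    · have : xs.filter p = [] := by
        rw [List.filter_eq_nil_iff]
        intro b hb hpb
        exact hnd.1 ((h x (by simp) b (by simp [hb]) hp hpb) ▸ hb)
      simp [hp, this]
    · simp only [List.filter_cons, hp]
      simp only [Bool.false_eq_true, if_false]
      exact ih hnd.2 (fun a ha b hb => h a (by simp [ha]) b (by simp [hb]))

lemma pv_words_prefix : ∀ a ∈ pvWords, ∀ b ∈ pvWords, a.1 <+: b.1 → a = b := by decide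

lemma pv_words_heads : ∀ wd ∈ pvWords, wd.1 ≠ [] ∧ PySem.Chars.isalpha (wd.1.headD ' ') = true := by
  decide

lemma pv_q_unique (cs : List Char) (i : Int) (hi : 0 ≤ i) :
    ∀ a ∈ pvWords, ∀ b ∈ pvWords, pvQ cs i a.1 = true → pvQ cs i b.1 = true → a = b := by
  intro a ha b hb hpa hpb
  rcases List.prefix_or_prefix_of_prefix (pv_q_prefix cs i hi a.1 hpa)
    (pv_q_prefix cs i hi b.1 hpb) with h | h
  · exact pv_words_prefix a ha b hb h
  · exact (pv_words_prefix b hb a ha h).symm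

lemma pv_ms_len_le_one (cs : List Char) (i : Int) (hi : 0 ≤ i) :
    (pvMs cs i).length ≤ 1 := by
  unfold pvMs
  by_cases hd : PySem.Chars.isdigit (PySem.List.pyGetD cs i ' ') = true
  · simp [hd, pv_isdigit_not_isalpha _ hd]
  · by_cases ha : PySem.Chars.isalpha (PySem.List.pyGetD cs i ' ') = true
    · simp only [hd, ha, Bool.false_eq_true, if_false, if_true, List.nil_append,
        List.length_map]
      exact pv_filter_len_le_one _ _ (by decide) (pv_q_unique cs i hi)
    · simp [hd, ha]

lemma pv_ms_reverse (cs : List Char) (i : Int) (hi : 0 ≤ i) :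
    (pvMs cs i).reverse = pvMs cs i := by
  have h := pv_ms_len_le_one cs i hi
  match hm : pvMs cs i with
  | [] => rfl
  | [a] => rfl
  | a :: b :: t => rw [hm] at h; simp at h

lemma pv_findSome?_if_eq_head? {α β : Type} (p : α → Bool) (f : α → β) (l : List α) :
    (l.findSome? (fun x => if p x then some (f x) else none)) = ((l.filter p).map f).head? := by
  induction l with
  | nil => rfl
  | cons x xs ih =>
    by_cases hp : p x = true
    · simp [List.findSome?, hp]
    · simp [List.findSome?, hp, ih]

lemma pv_findSome?_congr {α β : Type} (f g : α → Option β) (l : List α)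
    (h : ∀ a ∈ l, f a = g a) : l.findSome? f = l.findSome? g := by
  induction l with
  | nil => rfl
  | cons x xs ih =>
    simp only [List.findSome?, h x (by simp)]
    cases g x with
    | some b => rfl
    | none => exact ih (fun a ha => h a (by simp [ha]))

lemma pv_no_match_of_not_alpha (cs : List Char) (i : Int) (hi : 0 ≤ i)
    (hilt : i < (cs.length : Int))
    (ha : ¬ PySem.Chars.isalpha (PySem.List.pyGetD cs i ' ') = true) :
    ∀ wd ∈ pvWords, pvQ cs i wd.1 = false := by
  intro wd hwd
  by_contra hq
  rw [Bool.not_eq_false] at hq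
  have hpre := pv_q_prefix cs i hi wd.1 hq
  obtain ⟨hne, halpha⟩ := pv_words_heads wd hwd
  apply ha
  have hlen : i.toNat < cs.length := by omega
  have hget : PySem.List.pyGetD cs i ' ' = cs[i.toNat] := by
    exact PySem.List.pyGetD_eq_getElem cs ' ' hi (by omega)
  obtain ⟨rest, hrest⟩ := hpre
  match hw : wd.1 with
  | [] => exact absurd hw hne
  | a :: t =>
    rw [hw] at hrest
    have hdrop : cs.drop i.toNat = a :: (t ++ rest) := by rw [← hrest]; simp
    have : cs[i.toNat] = a := by
      have h0 : (cs.drop i.toNat)[0]'(by rw [hdrop]; simp) = a := by simp [hdrop]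
      rw [List.getElem_drop] at h0
      simpa using h0
    rw [hget, this]
    rw [hw] at halpha
    simpa using halpha

lemma pv_digitAt_eq_head (cs : List Char) (i : Int) (hi : 0 ≤ i) (hilt : i < (cs.length : Int)) :
    pvDigitAt cs i = (pvMs cs i).head? := by
  unfold pvDigitAt pvMs
  by_cases hd : PySem.Chars.isdigit (PySem.List.pyGetD cs i ' ') = true
  · simp [hd]
  · simp only [hd, Bool.false_eq_true, if_false, List.nil_append]
    by_cases ha : PySem.Chars.isalpha (PySem.List.pyGetD cs i ' ') = true
    · simp only [ha, if_true]
      have := pv_findSome?_if_eq_head? (fun wd => pvQ cs i wd.1) (Prod.snd : List Char × Char → Char) pvWords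
      simpa [pvQ] using this
    · simp only [ha, Bool.false_eq_true, if_false]
      rw [List.findSome?_eq_none_iff.mpr]
      · rfl
      · intro wd hwd
        have := pv_no_match_of_not_alpha cs i hi hilt ha wd hwd
        simp only [pvQ] at this
        simp [this]

lemma pv_convert_words :
    ∀ wd ∈ pvWords, convert_to_digit wd.1 = [wd.2] := by decide

lemma pv_digitsWords_eq : pvDigitsWords = pvWords.map Prod.fst := by decide

-- A's digit-collecting loop computes the flatMap of the per-index contributions
lemma pv_digits_eq (cs : List Char) (n : Int) :
    ((PySem.List.pyRange 0 n).foldl (fun digits i =>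
      let c := PySem.List.pyGetD cs i ' '
      let digits := if PySem.Chars.isdigit c then digits ++ [[c]] else digits
      if PySem.Chars.isalpha c then
        pvDigitsWords.foldl (fun digits w =>
          if PySem.List.slice cs (some i) (some (i + w.length)) == w then
            digits ++ [convert_to_digit w]
          else digits) digits
      else digits) []) =
    ((PySem.List.pyRange 0 n).flatMap (pvMs cs)).map (fun ch => [ch]) := by
  have hbody : (fun (digits : List (List Char)) (i : Int) =>
      let c := PySem.List.pyGetD cs i ' '
      let digits := if PySem.Chars.isdigit c then digits ++ [[c]] else digits
      if PySem.Chars.isalpha c then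
        pvDigitsWords.foldl (fun digits w =>
          if PySem.List.slice cs (some i) (some (i + w.length)) == w then
            digits ++ [convert_to_digit w]
          else digits) digits
      else digits) =
      (fun (digits : List (List Char)) (i : Int) => digits ++ (pvMs cs i).map (fun ch => [ch])) := by
    funext acc i
    show (let c := PySem.List.pyGetD cs i ' '
      let digits := if PySem.Chars.isdigit c then acc ++ [[c]] else acc
      if PySem.Chars.isalpha c then
        pvDigitsWords.foldl (fun digits w =>
          if PySem.List.slice cs (some i) (some (i + w.length)) == w then
            digits ++ [convert_to_digit w]
          else digits) digits
      else digits) = acc ++ (pvMs cs i).map (fun ch => [ch])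
    have hinner : ∀ (d0 : List (List Char)),
        pvDigitsWords.foldl (fun digits w =>
          if PySem.List.slice cs (some i) (some (i + w.length)) == w then
            digits ++ [convert_to_digit w]
          else digits) d0 =
        d0 ++ ((pvWords.filter (fun wd => pvQ cs i wd.1)).map Prod.snd).map (fun ch => [ch]) := by
      intro d0
      have := PySem.List.foldl_append_if
        (fun w => PySem.List.slice cs (some i) (some (i + w.length)) == w)
        convert_to_digit pvDigitsWords d0
      rw [this, pv_digitsWords_eq, List.filter_map, List.map_map, List.map_map]
      congr 1
      refine List.map_congr_left (fun wd hwd => ?_)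
      have hmem : wd ∈ pvWords := (List.mem_filter.mp hwd).1
      simp [Function.comp, pv_convert_words wd hmem]
    unfold pvMs
    by_cases hd : PySem.Chars.isdigit (PySem.List.pyGetD cs i ' ') = true
    · have hna := pv_isdigit_not_isalpha _ hd
      simp [hd, hna]
    · by_cases ha : PySem.Chars.isalpha (PySem.List.pyGetD cs i ' ') = true
      · simp only [hd, ha, Bool.false_eq_true, if_false, if_true, List.nil_append]
        exact hinner acc
      · simp [hd, ha]
  rw [hbody, PySem.List.foldl_append_eq_flatMap, List.nil_append, List.map_flatMap]

-- ===== VERDICT (by name: the statement is the Claim_ definition above) =====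
theorem find_calib_value2_spec : Claim_equal_find_calib_value2 := by
  intro line _
  unfold Spec_find_calib_value2 find_calib_value2 find_calib_value2_alt
  dsimp only
  have hlen : PySem.Str.len line = (line.toList.length : Int) := rfl
  rw [hlen, pv_digits_eq line.toList (line.toList.length : Int)]
  set cs := line.toList with hcs
  set n : Int := (cs.length : Int) with hn
  set D := (PySem.List.pyRange 0 n).flatMap (pvMs cs) with hD
  have hbounds : ∀ i ∈ PySem.List.pyRange 0 n, 0 ≤ i ∧ i < n := by
    intro i hi
    exact PySem.List.mem_pyRange_one.mp hi
  have hfirst : (PySem.List.pyRange 0 n).findSome? (pvDigitAt cs) = D.head? := by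
    rw [pv_findSome?_congr (pvDigitAt cs) (fun i => (pvMs cs i).head?) _
      (fun i hi => pv_digitAt_eq_head cs i (hbounds i hi).1 (hbounds i hi).2)]
    exact (List.head?_flatMap).symm
  have hrange : PySem.List.pyRange (n - 1) (-1) (-1) = (PySem.List.pyRange 0 n).reverse := by
    have := PySem.List.pyRange_neg_one_eq_reverse (n - 1) (-1)
    simpa using this
  have hlast : (PySem.List.pyRange (n - 1) (-1) (-1)).findSome? (pvDigitAt cs) = D.getLast? := by
    rw [hrange]
    rw [pv_findSome?_congr (pvDigitAt cs) (fun i => ((pvMs cs i).reverse).head?) _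
      (fun i hi => by
        have hmem := List.mem_reverse.mp hi
        show pvDigitAt cs i = ((pvMs cs i).reverse).head?
        rw [pv_ms_reverse cs i (hbounds i hmem).1]
        exact pv_digitAt_eq_head cs i (hbounds i hmem).1 (hbounds i hmem).2)]
    rw [List.getLast?_eq_head?_reverse, List.reverse_flatMap]
    exact (List.head?_flatMap).symm
  rw [hfirst, hlast]
  rcases D with _ | ⟨d, D'⟩
  · simp
  · rcases D' with _ | ⟨d', D''⟩
    · simp [PySem.List.pyGetD, PySem.List.pyGet?, PySem.List.pyIdx?]
    · have hlen2 : 2 ≤ ((d :: d' :: D'').map (fun ch => [ch])).length := by simp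
      rw [if_pos hlen2]
      have hne : (d :: d' :: D'') ≠ [] := by simp
      have hnem : ((d :: d' :: D'').map (fun ch => [ch])) ≠ [] := by simp
      have hfirstA : PySem.List.pyGetD ((d :: d' :: D'').map (fun ch => [ch])) 0 [] = [d] := by
        rw [PySem.List.pyGetD_eq_getElem _ _ (by norm_num) (by omega)]
        simp
      have hlastA : PySem.List.pyGetD ((d :: d' :: D'').map (fun ch => [ch])) (-1) []
          = [(d :: d' :: D'').getLast hne] := by
        rw [PySem.List.pyGetD_neg_one _ _ hnem]
        have h1 : ((d :: d' :: D'').map (fun ch => [ch])).getLast? =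
            some [(d :: d' :: D'').getLast hne] := by
          rw [List.getLast?_map, List.getLast?_eq_some_getLast hne]
          rfl
        have h2 : ((d :: d' :: D'').map (fun ch => [ch])).getLast? =
            some (((d :: d' :: D'').map (fun ch => [ch])).getLast hnem) :=
          List.getLast?_eq_some_getLast hnem
        rw [h1] at h2
        exact (Option.some.inj h2).symm
      rw [hfirstA, hlastA]
      have hl? : (d :: d' :: D'').getLast? = some ((d :: d' :: D'').getLast hne) :=
        List.getLast?_eq_some_getLast hne
      simp only [List.head?_cons, hl?]
      rfl
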